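-- pv_equiv track=rewrite | github.com/costad3atwit/PubMed_Graph_Analysis | Scripts/detect_co_mentions.py | get_max_tree_depth
-- ===== SOURCE A (Python) =====
-- def get_max_tree_depth(tree_nums):
--     """
--     Calculate maximum tree depth (number of dots) for a term.
--     Higher depth = more specific term.
--     Examples:
--       C           -> depth 0 (very general: "Disease")
--       C10         -> depth 1 (general: "Nervous System Diseases")
--       C10.228     -> depth 2 (specific: "Central Nervous System Diseases")
--       C10.228.140 -> depth 3 (very specific: "Alzheimer Disease")
--     """
--     if not tree_nums:
--         return 0
--
--     max_depth = 0
--     for tree_num in tree_nums.split(","):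
--         tree_num = tree_num.strip()
--         depth = tree_num.count(".")
--         max_depth = max(max_depth, depth)
--
--     return max_depth
-- ===== SOURCE B (Python) =====
-- def get_max_tree_depth(tree_nums):
--     current = 0
--     max_depth = 0
--     for ch in tree_nums:
--         if ch == ',':
--             current = 0
--         elif ch == '.':
--             current += 1
--             if current > max_depth:
--                 max_depth = current
--     return max_depth
-- ===== Notes on version B (the rewrite author's own statement) =====
-- stated objective: alternative
-- what changed: Replaces split-strip-count-per-segment with a single character scan keeping a current-segment dot counter that resets at commas and a running maximum, building no intermediate list of segments.
import Mathlib
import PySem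

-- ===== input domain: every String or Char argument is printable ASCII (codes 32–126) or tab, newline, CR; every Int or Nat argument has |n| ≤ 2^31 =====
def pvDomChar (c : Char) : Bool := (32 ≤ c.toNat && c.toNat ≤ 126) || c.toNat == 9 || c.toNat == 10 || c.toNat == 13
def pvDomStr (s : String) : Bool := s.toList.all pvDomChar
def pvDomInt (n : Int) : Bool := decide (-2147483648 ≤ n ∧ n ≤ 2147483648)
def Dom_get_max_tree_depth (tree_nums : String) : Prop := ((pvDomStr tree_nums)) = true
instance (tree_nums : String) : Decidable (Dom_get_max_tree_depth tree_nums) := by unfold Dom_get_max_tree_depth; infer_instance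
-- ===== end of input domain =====

-- B replaces the split/strip/count-per-segment pass with a single character scan (reset a dot counter at ',', bump it at '.'): same cost, no segment list built.

-- ===== PORT A =====
-- A: guard on empty string, then max over comma-separated pieces of the stripped piece's '.'-count
def get_max_tree_depth (tree_nums : String) : Int :=
  if tree_nums.toList = [] then 0
  else
    (PySem.Chars.splitOn tree_nums.toList [',']).foldl
      (fun max_depth tree_num =>
        max max_depth ((PySem.Chars.count (PySem.Chars.strip tree_num) ['.'] : Int)))
      0

-- ===== PORT B =====
-- B: one pass over the characters with state (current segment's dot count, running maximum)
def get_max_tree_depth_alt (tree_nums : String) : Int :=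
  (tree_nums.toList.foldl
    (fun st ch =>
      if ch = ',' then (0, st.2)
      else if ch = '.' then (st.1 + 1, max st.2 (st.1 + 1))
      else st)
    ((0 : Int), (0 : Int))).2

-- ===== PRECONDITION & SPEC =====
def Spec_get_max_tree_depth (tree_nums : String) (out : Int) : Prop := out = get_max_tree_depth_alt tree_nums
instance (tree_nums : String) (out : Int) : Decidable (Spec_get_max_tree_depth tree_nums out) := by unfold Spec_get_max_tree_depth; infer_instance

-- ===== CLAIM (what is proved, stated in full; the proofs are below) =====
def Claim_equal_get_max_tree_depth : Prop := ∀ (tree_nums : String), Dom_get_max_tree_depth tree_nums → Spec_get_max_tree_depth tree_nums (get_max_tree_depth tree_nums)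

-- ===== LEMMAS AND PROOFS =====

-- clean recursion computing Chars.splitOn's comma segments (cur holds the current piece, reversed)
def pvSegs (cur : List Char) : List Char → List (List Char)
  | [] => [cur.reverse]
  | c :: rest => if c = ',' then cur.reverse :: pvSegs [] rest else pvSegs (c :: cur) rest

theorem pvSplitOn_go_eq (fuel : Nat) (l cur : List Char) (acc : List (List Char)) (h : l.length ≤ fuel) :
    PySem.Chars.splitOn.go [','] fuel l cur acc = acc.reverse ++ pvSegs cur l := by
  induction fuel generalizing l cur acc with
  | zero =>
    have : l = [] := List.eq_nil_of_length_eq_zero (Nat.le_zero.mp h)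
    subst this
    simp [PySem.Chars.splitOn.go, pvSegs]
  | succ n ih =>
    cases l with
    | nil => simp [PySem.Chars.splitOn.go, pvSegs]
    | cons c rest =>
      have hr : rest.length ≤ n := by simpa using h
      rw [PySem.Chars.splitOn.go.eq_def]
      by_cases hc : c = ','
      · subst hc
        simp [List.isPrefixOf, pvSegs, ih _ _ _ hr]
      · simp [List.isPrefixOf, hc, pvSegs, ih _ _ _ hr]
        exact fun h' => absurd h'.symm hc

theorem pvSplitOn_eq (s : List Char) :
    PySem.Chars.splitOn s [','] = pvSegs [] s := by
  simpa using pvSplitOn_go_eq (s.length + 1) s [] [] (Nat.le_succ _)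

theorem pvCount_go_eq (fuel : Nat) (l : List Char) (acc : Nat) (h : l.length ≤ fuel) :
    PySem.Chars.count.go ['.'] fuel l acc = acc + l.count '.' := by
  induction fuel generalizing l acc with
  | zero =>
    have : l = [] := List.eq_nil_of_length_eq_zero (Nat.le_zero.mp h)
    subst this
    simp [PySem.Chars.count.go]
  | succ n ih =>
    cases l with
    | nil => simp [PySem.Chars.count.go]
    | cons c rest =>
      have hr : rest.length ≤ n := by simpa using h
      rw [PySem.Chars.count.go.eq_def]
      by_cases hc : c = '.'
      · subst hc
        simp [List.isPrefixOf, ih _ _ hr]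
        ring
      · simp [List.isPrefixOf, hc, ih _ _ hr]
        exact fun h' => hc h'.symm

theorem pvCount_eq (l : List Char) : PySem.Chars.count l ['.'] = l.count '.' := by
  simp [PySem.Chars.count, pvCount_go_eq l.length l 0 le_rfl]

theorem pvCount_dropWhile (l : List Char) :
    (l.dropWhile PySem.Chars.isspace).count '.' = l.count '.' := by
  conv_rhs => rw [← List.takeWhile_append_dropWhile (p := PySem.Chars.isspace) (l := l)]
  rw [List.count_append]
  have : (l.takeWhile PySem.Chars.isspace).count '.' = 0 := by
    rw [List.count_eq_zero]
    intro hmem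
    have := List.mem_takeWhile_imp hmem
    simp [PySem.Chars.isspace] at this
  omega

theorem pvCount_strip (l : List Char) :
    (PySem.Chars.strip l).count '.' = l.count '.' := by
  simp [PySem.Chars.strip, PySem.Chars.rstrip, PySem.Chars.lstrip, List.count_reverse]
  rw [pvCount_dropWhile, List.count_reverse, pvCount_dropWhile]

-- main loop correspondence: B's scan started inside segment prefix `pref` equals A's max-fold over pvSegs
theorem pvScan_eq (l : List Char) : ∀ (pref : List Char) (mx a : Int),
    max a ((pref.count '.' : Int)) = mx → 0 ≤ a →
    (l.foldl
      (fun st ch =>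
        if ch = ',' then ((0 : Int), st.2)
        else if ch = '.' then (st.1 + 1, max st.2 (st.1 + 1))
        else st)
      (((pref.count '.' : Int)), mx)).2 =
      (pvSegs pref l).foldl (fun x p => max x ((p.count '.' : Int))) a := by
  induction l with
  | nil =>
    intro pref mx a hmx ha
    simp [pvSegs, List.count_reverse, hmx]
  | cons c rest ih =>
    intro pref mx a hmx ha
    by_cases hc : c = ','
    · subst hc
      have h0 : (0:Int) ≤ mx := by
        have : (0:Int) ≤ (pref.count '.' : Int) := Int.natCast_nonneg _
        omega
      have key := ih [] mx mx (by simp; omega) h0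
      simp only [List.count_nil, Nat.cast_zero] at key
      simp only [List.foldl_cons, pvSegs, if_true, List.count_reverse, hmx]
      exact key
    · by_cases hd : c = '.'
      · subst hd
        have hcnt : ((('.' :: pref).count '.' : Nat) : Int) = (pref.count '.' : Int) + 1 := by
          simp
        have := ih ('.' :: pref) (max mx ((pref.count '.' : Int) + 1)) a
          (by rw [hcnt]; omega) ha
        rw [hcnt] at this
        simp only [pvSegs, if_neg (by decide : ¬('.' = ',')), List.foldl_cons, reduceIte]
        exact this
      · have hcnt : (((c :: pref).count '.' : Nat) : Int) = (pref.count '.' : Int) := by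
          simp [hd]
        have := ih (c :: pref) mx a (by rw [hcnt]; omega) ha
        rw [hcnt] at this
        simp only [pvSegs, if_neg hc, List.foldl_cons, if_neg hd]
        exact this

-- ===== VERDICT (by name: the statement is the Claim_ definition above) =====
theorem get_max_tree_depth_spec : Claim_equal_get_max_tree_depth := by
  intro s _
  unfold Spec_get_max_tree_depth get_max_tree_depth get_max_tree_depth_alt
  by_cases hnil : s.toList = []
  · simp [hnil]
  · rw [if_neg hnil, pvSplitOn_eq]
    have hfun : (fun (max_depth : Int) (tree_num : List Char) =>
        max max_depth ((PySem.Chars.count (PySem.Chars.strip tree_num) ['.'] : Int))) =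
        (fun x p => max x ((p.count '.' : Int))) := by
      funext x p
      rw [pvCount_eq, pvCount_strip]
    rw [hfun]
    have := pvScan_eq s.toList [] 0 0 (by simp) le_rfl
    simpa using this.symm
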